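-- pv_equiv track=rewrite | github.com/kundajelab/regulatory_lm | src/regulatory_lm/utils/remove_repeat_heavy_regions.py | has_lowercase_stretch
-- ===== SOURCE A (Python) =====
-- def has_lowercase_stretch(s: str, length: int) -> bool:
-- 	'''
-- 	Detects lowercase stretches in a sequence
-- 	'''
-- 	count = 0
-- 	for c in s:
-- 		if c.islower():
-- 			count += 1
-- 			if count >= length:
-- 				return True
-- 		else:
-- 			count = 0
-- 	return False
-- ===== SOURCE B (Python) =====
-- def has_lowercase_stretch(s: str, length: int) -> bool:
-- 	'''
-- 	Detects lowercase stretches in a sequence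
-- 	'''
-- 	runs = []
-- 	i = 0
-- 	n = len(s)
-- 	while i < n:
-- 		if s[i].islower():
-- 			j = i
-- 			while j < n and s[j].islower():
-- 				j += 1
-- 			runs.append(j - i)
-- 			i = j
-- 		else:
-- 			i += 1
-- 	return any(r >= length for r in runs)
-- ===== Notes on version B (the rewrite author's own statement) =====
-- stated objective: alternative
-- what changed: Replaces the incremental running-counter-with-early-exit scan by a run-segmentation pass that collects the lengths of all maximal lowercase runs and then tests whether any run is long enough.
import Mathlib
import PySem

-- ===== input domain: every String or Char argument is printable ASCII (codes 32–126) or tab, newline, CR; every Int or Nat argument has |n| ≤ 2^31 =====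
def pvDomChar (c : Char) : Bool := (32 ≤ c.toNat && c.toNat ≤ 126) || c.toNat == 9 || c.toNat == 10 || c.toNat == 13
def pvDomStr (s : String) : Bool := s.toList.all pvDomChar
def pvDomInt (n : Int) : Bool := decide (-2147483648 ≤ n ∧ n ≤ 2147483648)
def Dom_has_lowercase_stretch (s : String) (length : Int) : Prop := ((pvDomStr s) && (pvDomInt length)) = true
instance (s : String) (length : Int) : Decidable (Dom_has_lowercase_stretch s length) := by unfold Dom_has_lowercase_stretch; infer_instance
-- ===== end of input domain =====

-- B replaces A's running counter with early exit by run-segmentation: collect the lengths of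
-- all maximal lowercase runs, then test whether any run is long enough (alternative, same cost).

-- ===== PORT A =====
-- the for-loop with 'count' accumulator and early 'return True'
def hlsGoA (length : Int) : List Char → Int → Bool
  | [], _ => false
  | c :: cs, count =>
    if PySem.Chars.islower c then
      let count := count + 1
      if count ≥ length then true else hlsGoA length cs count
    else hlsGoA length cs 0

def has_lowercase_stretch (s : String) (length : Int) : Bool :=
  hlsGoA length s.toList 0

-- ===== PORT B =====
-- inner while: length of the leading lowercase run
def hlsLead : List Char → Nat
  | [] => 0
  | c :: cs => if PySem.Chars.islower c then hlsLead cs + 1 else 0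

-- outer while: the list of lengths of the maximal lowercase runs
def hlsRuns : List Char → List Nat
  | [] => []
  | c :: cs =>
    if PySem.Chars.islower c then
      (hlsLead cs + 1) :: hlsRuns (cs.drop (hlsLead cs))
    else hlsRuns cs
  termination_by l => l.length
  decreasing_by
    · simp only [List.length_drop, List.length_cons]
      omega
    · simp

def has_lowercase_stretch_alt (s : String) (length : Int) : Bool :=
  (hlsRuns s.toList).any (fun r => decide ((r : Int) ≥ length))

-- ===== PRECONDITION & SPEC =====
def Spec_has_lowercase_stretch (s : String) (length : Int) (out : Bool) : Prop := out = has_lowercase_stretch_alt s length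
instance (s : String) (length : Int) (out : Bool) : Decidable (Spec_has_lowercase_stretch s length out) := by unfold Spec_has_lowercase_stretch; infer_instance

-- ===== CLAIM (what is proved, stated in full; the proofs are below) =====
def Claim_equal_has_lowercase_stretch : Prop := ∀ (s : String) (length : Int), Dom_has_lowercase_stretch s length → Spec_has_lowercase_stretch s length (has_lowercase_stretch s length)

-- ===== LEMMAS AND PROOFS =====

-- Inside a run: A's scanner on l with accumulator count (< length) returns true iff the
-- leading run pushes the counter to length, and otherwise continues after the run with count 0.
theorem hlsGoA_run (length : Int) (l : List Char) (count : Int) (h : count < length) :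
    hlsGoA length l count =
      ((decide ((count + (hlsLead l : Int)) ≥ length) && decide (1 ≤ hlsLead l))
        || hlsGoA length (l.drop (hlsLead l)) 0) := by
  induction l generalizing count with
  | nil => simp [hlsGoA, hlsLead]
  | cons c cs ih =>
    by_cases hc : PySem.Chars.islower c
    · simp only [hlsGoA, hlsLead, hc, if_true]
      by_cases hge : count + 1 ≥ length
      · have : (count + ((hlsLead cs : Int) + 1)) ≥ length := by
          have : (0 : Int) ≤ (hlsLead cs : Int) := Int.natCast_nonneg _
          omega
        simp [hge, this]
      · have h1 : count + 1 < length := by omega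
        rw [if_neg hge, ih (count + 1) h1]
        have harith : count + 1 + (hlsLead cs : Int) = count + ((hlsLead cs : Int) + 1) := by ring
        by_cases hk : 1 ≤ hlsLead cs
        · simp only [List.drop_succ_cons]
          simp [hk]
          rw [harith]
        · have hk0 : hlsLead cs = 0 := by omega
          simp [hk0, hge, List.drop_succ_cons]
    · simp [hlsGoA, hlsLead, hc]

-- Main: A's scan started at count 0 equals B's any-over-run-lengths.
theorem hlsGoA_eq_runs (length : Int) (l : List Char) :
    hlsGoA length l 0 = (hlsRuns l).any (fun r => decide ((r : Int) ≥ length)) := by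
  induction hn : l.length using Nat.strong_induction_on generalizing l with
  | _ n ih =>
    match l, hn with
    | [], _ => simp [hlsGoA, hlsRuns]
    | c :: cs, hn =>
      by_cases hc : PySem.Chars.islower c
      · by_cases hlen : 0 < length
        · rw [hlsGoA_run length (c :: cs) 0 hlen]
          simp only [hlsRuns, hc, if_true, hlsLead, List.any_cons, List.drop_succ_cons]
          rw [ih (cs.drop (hlsLead cs)).length
                (by subst hn; simp) _ rfl]
          have hone : 1 ≤ hlsLead cs + 1 := Nat.le_add_left 1 _
          simp [hone]
        · -- length ≤ 0: A returns true at the first lowercase char; B has a run of size ≥ 1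
          simp only [hlsGoA, hc, if_true, zero_add]
          have h1 : (1 : Int) ≥ length := by omega
          simp only [ge_iff_le, h1]
          simp only [hlsRuns, hc, if_true, List.any_cons]
          simp
          omega
      · simp only [hlsGoA, hc, hlsRuns]
        exact ih cs.length (by subst hn; simp) cs rfl

-- ===== VERDICT (by name: the statement is the Claim_ definition above) =====
theorem has_lowercase_stretch_spec : Claim_equal_has_lowercase_stretch := by
  intro s length _
  unfold Spec_has_lowercase_stretch has_lowercase_stretch has_lowercase_stretch_alt
  exact hlsGoA_eq_runs length s.toList
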